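-- pv_equiv track=rewrite | github.com/161043261/algorithm | src/diff-array/lc3347.py | maxFrequency2
-- ===== SOURCE A (Python) =====
-- from typing import Dict, List
--
-- def maxFrequency2(nums: List[int], k: int, numOperations: int) -> int:
--     num2cnt: Dict[int, int] = dict({})
--     val2diff: Dict[int, int] = dict({})
--
--     for num in nums:
--         # if num in num2cnt:
--         #     num2cnt[num] += 1
--         # else:
--         #     num2cnt[num] = 1
--         num2cnt[num] = num2cnt.get(num, 0) + 1
--
--         if num not in val2diff:
--             val2diff[num] = 0
--
--         # if num - k in val2diff:
--         #     val2diff[num - k] += 1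
--         # else:
--         #     val2diff[num - k] = 1
--         val2diff[num - k] = val2diff.get(num - k, 0) + 1
--
--         # if num + k + 1 in val2diff:
--         #     val2diff[num + k + 1] -= 1
--         # else:
--         #     val2diff[num + k + 1] = -1
--         val2diff[num + k + 1] = val2diff.get(num + k + 1, 0) - 1
--
--     ans = sumDiff = 0
--     for val, diff in sorted(val2diff.items()):
--         sumDiff += diff
--         ans = max(
--             ans,
--             min(sumDiff, num2cnt.get(val, 0) + numOperations),
--         )
--     return ans
-- ===== SOURCE B (Python) =====
-- def maxFrequency2(nums, k, numOperations):
--     cnt = {}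
--     for x in nums:
--         cnt[x] = cnt.get(x, 0) + 1
--     best = 0
--     for c in set(nums) | {x - k for x in nums}:
--         within = sum(1 for x in nums if c - k <= x <= c + k)
--         best = max(best, min(within, cnt.get(c, 0) + numOperations))
--     return best
-- ===== Notes on version B (the rewrite author's own statement) =====
-- stated objective: simpler
-- what changed: Replaces the difference-array dict, the sort of its event keys and the prefix-sum sweep by a direct evaluation: for each candidate target (an element or element-k) count the elements within [c-k,c+k] in one comprehension and take the max of min(count, cnt[c]+numOperations).
import Mathlib
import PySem

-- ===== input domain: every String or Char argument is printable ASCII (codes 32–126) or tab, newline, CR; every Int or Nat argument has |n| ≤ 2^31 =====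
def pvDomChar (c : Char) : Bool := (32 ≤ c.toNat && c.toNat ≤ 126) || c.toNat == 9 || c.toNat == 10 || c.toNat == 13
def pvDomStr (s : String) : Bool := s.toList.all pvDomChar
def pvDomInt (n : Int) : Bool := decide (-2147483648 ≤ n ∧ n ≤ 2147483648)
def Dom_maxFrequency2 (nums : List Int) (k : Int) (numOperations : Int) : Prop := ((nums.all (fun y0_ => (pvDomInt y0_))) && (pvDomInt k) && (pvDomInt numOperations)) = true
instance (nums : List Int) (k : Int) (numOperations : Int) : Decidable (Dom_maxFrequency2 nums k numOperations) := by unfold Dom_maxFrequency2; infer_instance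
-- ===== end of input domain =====

-- B replaces A's difference-array dict + key sort + prefix-sum sweep by a direct evaluation of
-- each candidate target value (simpler decomposition, not faster).

-- ===== PORT A =====
-- one iteration of A's loop body on the val2diff dict
def pvDiffStep (k : Int) (d : PySem.Dict Int Int) (num : Int) : PySem.Dict Int Int :=
  let d0 := if d.contains num then d else d.insert num 0
  let d1 := d0.insert (num - k) (d0.getD (num - k) 0 + 1)
  d1.insert (num + k + 1) (d1.getD (num + k + 1) 0 - 1)

def maxFrequency2 (nums : List Int) (k : Int) (numOperations : Int) : Int :=
  let st := nums.foldl
    (fun (st : PySem.Dict Int Int × PySem.Dict Int Int) num =>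
      (st.1.insert num (st.1.getD num 0 + 1), pvDiffStep k st.2 num))
    (PySem.Dict.empty, PySem.Dict.empty)
  -- dict keys are unique, so Python's lexicographic sort of the item pairs is the stable sort by first component
  let pairs := PySem.List.sorted st.2.items (fun p => p.1) false
  (pairs.foldl
    (fun (acc : Int × Int) pr =>
      let sumDiff := acc.2 + pr.2
      (max acc.1 (min sumDiff (st.1.getD pr.1 0 + numOperations)), sumDiff))
    (0, 0)).1

-- ===== PORT B =====
def maxFrequency2_alt (nums : List Int) (k : Int) (numOperations : Int) : Int :=
  let cnt := nums.foldl (fun (d : PySem.Dict Int Int) x => d.insert x (d.getD x 0 + 1)) PySem.Dict.empty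
  let cands : PySem.Set Int := PySem.Set.union (PySem.Set.ofList nums) (nums.map (fun x => x - k))
  cands.foldl
    (fun best c =>
      let within : Int := ((nums.filter (fun x => decide (c - k ≤ x) && decide (x ≤ c + k))).length : Int)
      max best (min within (cnt.getD c 0 + numOperations)))
    0

-- ===== PRECONDITION & SPEC =====
def Spec_maxFrequency2 (nums : List Int) (k : Int) (numOperations : Int) (out : Int) : Prop := out = maxFrequency2_alt nums k numOperations
instance (nums : List Int) (k : Int) (numOperations : Int) (out : Int) : Decidable (Spec_maxFrequency2 nums k numOperations out) := by unfold Spec_maxFrequency2; infer_instance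

-- ===== CLAIM (what is proved, stated in full; the proofs are below) =====
def Claim_equal_maxFrequency2 : Prop := ∀ (nums : List Int) (k : Int) (numOperations : Int), Dom_maxFrequency2 nums k numOperations → Spec_maxFrequency2 nums k numOperations (maxFrequency2 nums k numOperations)

-- ===== LEMMAS AND PROOFS =====

-- pvS nums k v = (# elements ≤ v+k) − (# elements ≤ v−k−1): A's prefix sum at event key v
def pvS (nums : List Int) (k v : Int) : Int :=
  (nums.countP (fun x => decide (x ≤ v + k)) : Int) - (nums.countP (fun x => decide (x ≤ v - k - 1)) : Int)

-- pvW nums k v = # elements in [v−k, v+k]: B's window count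
def pvW (nums : List Int) (k v : Int) : Int :=
  ((nums.filter (fun x => decide (v - k ≤ x) && decide (x ≤ v + k))).length : Int)

lemma pv_counter_getD (nums : List Int) (v : Int) :
    (nums.foldl (fun (d : PySem.Dict Int Int) x => d.insert x (d.getD x 0 + 1)) PySem.Dict.empty).getD v 0
      = (nums.count v : Int) := by
  rw [PySem.Dict.getD_foldl_insert_add_one]
  simp

lemma pv_step_keys (k : Int) (d : PySem.Dict Int Int) (x v : Int) :
    v ∈ (pvDiffStep k d x).keys ↔ v = x ∨ v = x - k ∨ v = x + k + 1 ∨ v ∈ d.keys := by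
  unfold pvDiffStep
  by_cases hc : d.contains x = true
  · have hx : x ∈ d.keys := (PySem.Dict.contains_iff_mem_keys d x).1 hc
    simp only [if_pos hc, PySem.Dict.mem_keys_insert]
    constructor
    · rintro (h | h | h) <;> tauto
    · rintro (rfl | h | h | h) <;> tauto
  · simp only [if_neg hc, PySem.Dict.mem_keys_insert]
    tauto

lemma pv_diff_keys (k : Int) (l : List Int) (d : PySem.Dict Int Int) (v : Int) :
    v ∈ (l.foldl (pvDiffStep k) d).keys ↔ v ∈ d.keys ∨ ∃ x ∈ l, v = x ∨ v = x - k ∨ v = x + k + 1 := by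
  induction l generalizing d with
  | nil => simp
  | cons x l ih =>
      rw [List.foldl_cons, ih, pv_step_keys]
      constructor
      · rintro ((h | h | h | h) | ⟨y, hy, h⟩)
        · exact Or.inr ⟨x, List.mem_cons_self, Or.inl h⟩
        · exact Or.inr ⟨x, List.mem_cons_self, Or.inr (Or.inl h)⟩
        · exact Or.inr ⟨x, List.mem_cons_self, Or.inr (Or.inr h)⟩
        · exact Or.inl h
        · exact Or.inr ⟨y, List.mem_cons_of_mem _ hy, h⟩
      · rintro (h | ⟨y, hy, h⟩)
        · exact Or.inl (Or.inr (Or.inr (Or.inr h)))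
        · rcases List.mem_cons.1 hy with rfl | hy
          · left; tauto
          · exact Or.inr ⟨y, hy, h⟩

lemma pv_step_nodup (k : Int) (d : PySem.Dict Int Int) (x : Int) (h : d.keys.Nodup) :
    (pvDiffStep k d x).keys.Nodup := by
  unfold pvDiffStep
  apply PySem.Dict.nodup_keys_insert
  apply PySem.Dict.nodup_keys_insert
  split
  · exact h
  · exact PySem.Dict.nodup_keys_insert _ _ _ h

lemma pv_diff_nodup (k : Int) (l : List Int) (d : PySem.Dict Int Int) (h : d.keys.Nodup) :
    (l.foldl (pvDiffStep k) d).keys.Nodup := by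
  induction l generalizing d with
  | nil => exact h
  | cons x l ih => exact ih _ (pv_step_nodup k d x h)

lemma pv_step_getD (k : Int) (d : PySem.Dict Int Int) (x v : Int) :
    (pvDiffStep k d x).getD v 0
      = d.getD v 0 + (if v = x - k then 1 else 0) + (if v = x + k + 1 then (-1 : Int) else 0) := by
  unfold pvDiffStep
  have h0 : ∀ w : Int, (if d.contains x then d else d.insert x 0).getD w 0 = d.getD w 0 := by
    intro w
    split
    · rfl
    · next hc =>
        rw [PySem.Dict.getD_insert]
        split
        · next hv =>
            subst hv
            exact (PySem.Dict.getD_of_not_contains d 0 (by simpa using hc)).symm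
        · rfl
  rcases eq_or_ne v (x + k + 1) with rfl | hv1
  · simp only [PySem.Dict.getD_insert, h0]
    split_ifs <;> omega
  · rcases eq_or_ne v (x - k) with rfl | hv2
    · simp only [PySem.Dict.getD_insert, h0]
      split_ifs <;> omega
    · simp only [PySem.Dict.getD_insert, h0]
      split_ifs <;> omega

lemma pv_diff_getD (k : Int) (l : List Int) (d : PySem.Dict Int Int) (v : Int) :
    (l.foldl (pvDiffStep k) d).getD v 0
      = d.getD v 0 + ((l.count (v + k) : Int) - (l.count (v - k - 1) : Int)) := by
  induction l generalizing d with
  | nil => simp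
  | cons x l ih =>
      rw [List.foldl_cons, ih, pv_step_getD, List.count_cons, List.count_cons]
      simp only [beq_iff_eq]
      split_ifs <;> push_cast <;> omega

lemma pv_sum_if_eq (a c : Int) (M : List Int) (hnd : M.Nodup) :
    ((M.map (fun key => if key = a then c else 0)).sum : Int) = if a ∈ M then c else 0 := by
  induction M with
  | nil => simp
  | cons m M ih =>
      simp only [List.nodup_cons] at hnd
      simp only [List.map_cons, List.sum_cons, ih hnd.2, List.mem_cons]
      by_cases hm : m = a
      · subst hm
        simp [hnd.1]
      · simp [hm, Ne.symm hm]

lemma pv_sum_map_add (f g : Int → Int) (M : List Int) :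
    ((M.map (fun e => f e + g e)).sum : Int) = (M.map f).sum + (M.map g).sum := by
  induction M with
  | nil => simp
  | cons m M ih => simp only [List.map_cons, List.sum_cons, ih]; ring

-- Σ over the keys ≤ v of count(key − t) = # elements x with x + t ≤ v, given all x + t are keys
lemma pv_sum_count (t v : Int) (K : List Int) (hnd : K.Nodup) (l : List Int)
    (hK : ∀ x ∈ l, x + t ∈ K) :
    (((K.filter (fun key => decide (key ≤ v))).map (fun key => (l.count (key - t) : Int))).sum)
      = (l.countP (fun x => decide (x + t ≤ v)) : Int) := by
  induction l with
  | nil => simp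
  | cons x l ih =>
      have hx : x + t ∈ K := hK x List.mem_cons_self
      have hrec := ih (fun y hy => hK y (List.mem_cons_of_mem _ hy))
      have hstep : ∀ key : Int, ((x :: l).count (key - t) : Int)
          = (l.count (key - t) : Int) + (if key = x + t then 1 else 0) := by
        intro key
        rw [List.count_cons]
        simp only [beq_iff_eq]
        split_ifs <;> push_cast <;> omega
      rw [List.map_congr_left (fun key _ => hstep key),
        pv_sum_map_add (fun key => (l.count (key - t) : Int)) (fun key => if key = x + t then 1 else 0),
        hrec, pv_sum_if_eq (x + t) 1 _ (List.Nodup.filter _ hnd)]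
      have hmem : (x + t) ∈ K.filter (fun key => decide (key ≤ v)) ↔ (x + t ≤ v) := by
        simp [List.mem_filter, hx]
      simp only [hmem, List.countP_cons, decide_eq_true_eq]
      push_cast
      split_ifs <;> omega

-- Σ over the keys ≤ v of the diff value = pvS nums k v (A's prefix sum at key v)
lemma pv_prefix_sum (k v : Int) (nums : List Int) (K : List Int) (hnd : K.Nodup)
    (hK : ∀ x ∈ nums, (x - k ∈ K ∧ x + k + 1 ∈ K)) :
    (((K.filter (fun key => decide (key ≤ v))).map
        (fun key => ((nums.count (key + k) : Int) - (nums.count (key - k - 1) : Int)))).sum)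
      = pvS nums k v := by
  have h1 := pv_sum_count (-k) v K hnd nums (fun x hx => by simpa using (hK x hx).1)
  have h2 := pv_sum_count (k + 1) v K hnd nums (fun x hx => by
    rw [show x + (k + 1) = x + k + 1 by ring]
    exact (hK x hx).2)
  have e : ∀ key : Int, ((nums.count (key + k) : Int) - (nums.count (key - k - 1) : Int))
      = (nums.count (key - -k) : Int) + (-(nums.count (key - (k + 1)) : Int)) := by
    intro key
    rw [show key - -k = key + k by ring, show key - (k + 1) = key - k - 1 by ring]
    ring
  rw [List.map_congr_left (fun key _ => e key),
    pv_sum_map_add (fun key => (nums.count (key - -k) : Int)) (fun key => -(nums.count (key - (k + 1)) : Int)),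
    h1]
  have h2' : (((K.filter (fun key => decide (key ≤ v))).map
      (fun key => -(nums.count (key - (k + 1)) : Int))).sum)
      = -((nums.countP (fun x => decide (x + (k + 1) ≤ v)) : Int)) := by
    rw [← h2]
    induction (K.filter (fun key => decide (key ≤ v))) with
    | nil => simp
    | cons m M ih => simp only [List.map_cons, List.sum_cons, ih]; ring
  rw [h2']
  unfold pvS
  have c1 : nums.countP (fun x => decide (x + -k ≤ v)) = nums.countP (fun x => decide (x ≤ v + k)) := by
    apply List.countP_congr
    intro x _
    simp only [decide_eq_true_eq]
    omega
  have c2 : nums.countP (fun x => decide (x + (k + 1) ≤ v)) = nums.countP (fun x => decide (x ≤ v - k - 1)) := by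
    apply List.countP_congr
    intro x _
    simp only [decide_eq_true_eq]
    omega
  rw [c1, c2]
  ring

-- the sweep fold, when every prefix sum equals pvS at the current key, is a running max of min-terms
lemma pv_sweep (nums : List Int) (k : Int) (c : Int → Int) (L : List (Int × Int)) :
    ∀ (a s : Int),
      (∀ L₁ p L₂, L = L₁ ++ p :: L₂ → s + (((L₁.map (fun pr : Int × Int => pr.2)).sum) + p.2) = pvS nums k p.1) →
      (L.foldl (fun (acc : Int × Int) pr =>
          (max acc.1 (min (acc.2 + pr.2) (c pr.1)), acc.2 + pr.2)) (a, s)).1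
        = L.foldl (fun m pr => max m (min (pvS nums k pr.1) (c pr.1))) a := by
  induction L with
  | nil => intro a s _; rfl
  | cons p L ih =>
      intro a s h
      have hp : s + p.2 = pvS nums k p.1 := by
        have := h [] p L rfl
        simpa using this
      rw [List.foldl_cons, List.foldl_cons]
      dsimp only
      rw [hp]
      apply ih
      intro L₁ q L₂ hsplit
      have := h (p :: L₁) q L₂ (by simp [hsplit])
      simp only [List.map_cons, List.sum_cons] at this
      omega

lemma pv_foldl_max_le {α : Type} (f : α → Int) (z : Int) (L : List α) :
    ∀ a : Int, a ≤ z → (∀ x ∈ L, f x ≤ z) → L.foldl (fun m x => max m (f x)) a ≤ z := by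
  induction L with
  | nil => intro a ha _; exact ha
  | cons x L ih =>
      intro a ha h
      refine ih _ ?_ (fun y hy => h y (List.mem_cons_of_mem _ hy))
      have := h x List.mem_cons_self
      show max a (f x) ≤ z
      omega

lemma pv_S_eq_W (nums : List Int) (k v : Int) (hk : 0 ≤ k) : pvS nums k v = pvW nums k v := by
  unfold pvS pvW
  rw [← List.countP_eq_length_filter]
  induction nums with
  | nil => simp
  | cons x l ih =>
      simp only [List.countP_cons, Bool.and_eq_true, decide_eq_true_eq]
      push_cast
      split_ifs <;> omega

lemma pv_S_nonpos (nums : List Int) (k v : Int) (hk : k < 0) : pvS nums k v ≤ 0 := by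
  unfold pvS
  have : nums.countP (fun x => decide (x ≤ v + k)) ≤ nums.countP (fun x => decide (x ≤ v - k - 1)) := by
    apply List.countP_mono_left
    intro x _
    simp only [decide_eq_true_eq]
    omega
  omega

lemma pv_W_zero (nums : List Int) (k v : Int) (hk : k < 0) : pvW nums k v = 0 := by
  unfold pvW
  have h : ∀ a ∈ nums, ¬((decide (v - k ≤ a) && decide (a ≤ v + k)) = true) := by
    intro a _
    simp only [Bool.and_eq_true, decide_eq_true_eq, not_and, not_le]
    intro h1
    omega
  rw [List.filter_eq_nil_iff.2 h]
  simp

-- one A-term is dominated by B's fold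
lemma pv_term_le (nums : List Int) (k ops : Int) (Cset : List Int) (v : Int)
    (hC : ∀ c, (c ∈ nums ∨ ∃ x ∈ nums, c = x - k) → c ∈ Cset) :
    min (pvS nums k v) ((nums.count v : Int) + ops)
      ≤ Cset.foldl (fun m c => max m (min (pvW nums k c) ((nums.count c : Int) + ops))) 0 := by
  have hB := PySem.List.le_foldl_max_int Cset (fun c => min (pvW nums k c) ((nums.count c : Int) + ops)) 0
  rcases lt_or_ge k 0 with hk | hk
  · have := pv_S_nonpos nums k v hk
    have h0 := hB.1
    omega
  · rw [pv_S_eq_W nums k v hk]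
    by_cases hvC : v ∈ nums ∨ ∃ x ∈ nums, v = x - k
    · have := hB.2 v (hC v hvC)
      omega
    · -- v is a pure x+k+1 event key not in nums: count v = 0
      have hvnot : v ∉ nums := fun h => hvC (Or.inl h)
      have hcnt : nums.count v = 0 := List.count_eq_zero.2 hvnot
      by_cases hw : pvW nums k v ≤ 0
      · have h0 := hB.1
        omega
      · have hw' : 0 < pvW nums k v := not_le.1 hw
        -- the window at v is nonempty; let m be its maximum element, then the window at m−k contains it
        set F := nums.filter (fun x => decide (v - k ≤ x) && decide (x ≤ v + k)) with hF
        have hFne : F ≠ [] := by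
          intro hnil
          have hz : pvW nums k v = 0 := by
            unfold pvW
            rw [← hF, hnil]
            rfl
          omega
        obtain ⟨m, hM⟩ : ∃ m, PySem.List.max? F (fun x => x) = some m := by
          cases hM : PySem.List.max? F (fun x => x) with
          | none => exact absurd ((PySem.List.max?_eq_none_iff F _).1 hM) hFne
          | some m => exact ⟨m, rfl⟩
        have hmF : m ∈ F := PySem.List.max?_mem hM
        have hmax : ∀ y ∈ F, y ≤ m := fun y hy => PySem.List.max?_isMax hM y hy
        rw [hF, List.mem_filter] at hmF
        have hmnums : m ∈ nums := hmF.1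
        have hmbounds : v - k ≤ m ∧ m ≤ v + k := by
          have := hmF.2
          simp only [Bool.and_eq_true, decide_eq_true_eq] at this
          exact this
        have hmkC : m - k ∈ Cset := hC (m - k) (Or.inr ⟨m, hmnums, rfl⟩)
        have hWle : pvW nums k v ≤ pvW nums k (m - k) := by
          unfold pvW
          rw [← List.countP_eq_length_filter, ← List.countP_eq_length_filter]
          have hmono := List.countP_mono_left
            (l := nums)
            (p := fun x => decide (v - k ≤ x) && decide (x ≤ v + k))
            (q := fun x => decide ((m - k) - k ≤ x) && decide (x ≤ (m - k) + k))
            (by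
              intro x hx hpx
              have hxF : x ∈ F := by
                rw [hF, List.mem_filter]
                exact ⟨hx, hpx⟩
              have hxm : x ≤ m := hmax x hxF
              simp only [Bool.and_eq_true, decide_eq_true_eq] at hpx ⊢
              omega)
          omega
        have hterm := hB.2 (m - k) hmkC
        have hc2 : (0 : Int) ≤ (nums.count (m - k) : Int) := by positivity
        simp only at hterm
        omega

-- one B-term is dominated by A's fold
lemma pv_cand_le (nums : List Int) (k ops : Int) (L : List (Int × Int)) (c : Int)
    (hcL : ∃ pr ∈ L, pr.1 = c) :
    min (pvW nums k c) ((nums.count c : Int) + ops)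
      ≤ L.foldl (fun m pr => max m (min (pvS nums k pr.1) ((nums.count pr.1 : Int) + ops))) 0 := by
  have hA := PySem.List.le_foldl_max_int L
    (fun pr : Int × Int => min (pvS nums k pr.1) ((nums.count pr.1 : Int) + ops)) 0
  obtain ⟨pr, hpr, rfl⟩ := hcL
  rcases lt_or_ge k 0 with hk | hk
  · have := pv_W_zero nums k pr.1 hk
    have h0 := hA.1
    omega
  · rw [← pv_S_eq_W nums k pr.1 hk]
    have := hA.2 pr hpr
    simp only at this
    omega

-- ===== VERDICT (by name: the statement is the Claim_ definition above) =====
theorem maxFrequency2_spec : Claim_equal_maxFrequency2 := by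
  intro nums k ops _
  unfold Spec_maxFrequency2 maxFrequency2 maxFrequency2_alt
  rw [PySem.List.foldl_prod_mk
    (f := fun (d : PySem.Dict Int Int) num => d.insert num (d.getD num 0 + 1))
    (g := fun (d : PySem.Dict Int Int) num => pvDiffStep k d num)]
  dsimp only
  have hgd : List.foldl (fun (d : PySem.Dict Int Int) num => pvDiffStep k d num) PySem.Dict.empty nums
      = List.foldl (pvDiffStep k) PySem.Dict.empty nums := rfl
  rw [hgd]
  set D := List.foldl (pvDiffStep k) PySem.Dict.empty nums with hD
  set L := PySem.List.sorted D.items (fun p => p.1) false with hL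
  -- counter lookups are counts
  simp only [pv_counter_getD]
  -- dict facts
  have hKnd : D.keys.Nodup := pv_diff_nodup k nums PySem.Dict.empty (by simp)
  have hKmem : ∀ v : Int, v ∈ D.keys ↔ ∃ x ∈ nums, v = x ∨ v = x - k ∨ v = x + k + 1 := by
    intro v
    rw [hD, pv_diff_keys]
    simp
  have hval : ∀ v : Int, D.getD v 0 = (nums.count (v + k) : Int) - (nums.count (v - k - 1) : Int) := by
    intro v
    rw [hD, pv_diff_getD]
    simp
  -- sorted-list facts
  have hperm : L.Perm D.items := PySem.List.sorted_perm D.items (fun p => p.1) false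
  have hfstnd : (L.map (fun p : Int × Int => p.1)).Nodup := by
    have h2 : (D.items.map (fun p : Int × Int => p.1)).Nodup := hKnd
    exact ((hperm.map (fun p : Int × Int => p.1)).nodup_iff).2 h2
  have hpair : L.Pairwise (fun a b : Int × Int => a.1 < b.1) := by
    have hle : L.Pairwise (fun a b : Int × Int => a.1 ≤ b.1) :=
      PySem.List.sorted_pairwise D.items (fun p => p.1)
    have hne : L.Pairwise (fun a b : Int × Int => a.1 ≠ b.1) := by
      rw [List.Nodup, List.pairwise_map] at hfstnd
      exact hfstnd
    exact (hle.and hne).imp (fun h => lt_of_le_of_ne h.1 h.2)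
  -- prefix-sum hypothesis for the sweep
  have hpre : ∀ L₁ (p : Int × Int) L₂, L = L₁ ++ p :: L₂ →
      (0 : Int) + (((L₁.map (fun pr : Int × Int => pr.2)).sum) + p.2) = pvS nums k p.1 := by
    intro L₁ p L₂ hs
    have hfilt : L.filter (fun q : Int × Int => decide (q.1 ≤ p.1)) = L₁ ++ [p] := by
      rw [hs]
      have hp2 := hpair
      rw [hs, List.pairwise_append] at hp2
      obtain ⟨hP1, hP2, hcross⟩ := hp2
      have hL2 : ∀ q ∈ L₂, p.1 < q.1 := (List.pairwise_cons.1 hP2).1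
      have hL1 : ∀ a ∈ L₁, a.1 < p.1 := fun a ha => hcross a ha p List.mem_cons_self
      rw [List.filter_append, List.filter_cons]
      have hL1f : L₁.filter (fun q : Int × Int => decide (q.1 ≤ p.1)) = L₁ :=
        List.filter_eq_self.2 (fun a ha => by simpa using le_of_lt (hL1 a ha))
      have hL2f : L₂.filter (fun q : Int × Int => decide (q.1 ≤ p.1)) = [] :=
        List.filter_eq_nil_iff.2 (fun a ha => by simpa using hL2 a ha)
      rw [hL1f, hL2f]
      simp
    have hsum : ((L₁.map (fun pr : Int × Int => pr.2)).sum) + p.2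
        = (((L.filter (fun q : Int × Int => decide (q.1 ≤ p.1))).map (fun pr : Int × Int => pr.2)).sum) := by
      rw [hfilt]
      simp
    rw [hsum]
    have hpermf : (L.filter (fun q : Int × Int => decide (q.1 ≤ p.1))).Perm
        (D.items.filter (fun q : Int × Int => decide (q.1 ≤ p.1))) := hperm.filter _
    have hpsum : (((L.filter (fun q : Int × Int => decide (q.1 ≤ p.1))).map (fun pr : Int × Int => pr.2)).sum)
        = (((D.items.filter (fun q : Int × Int => decide (q.1 ≤ p.1))).map (fun pr : Int × Int => pr.2)).sum) :=
      (hpermf.map (fun pr : Int × Int => pr.2)).sum_eq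
    rw [hpsum]
    have hitems : D.items = D.keys.map (fun key => (key, D.getD key 0)) :=
      PySem.Dict.items_eq_map_keys D hKnd 0
    rw [hitems, List.filter_map, List.map_map]
    have hcomp : ((fun q : Int × Int => decide (q.1 ≤ p.1)) ∘ (fun key => (key, D.getD key 0)))
        = fun key : Int => decide (key ≤ p.1) := rfl
    rw [hcomp]
    have hcomp2 : ((fun pr : Int × Int => pr.2) ∘ (fun key => (key, D.getD key 0)))
        = fun key : Int => D.getD key 0 := rfl
    rw [hcomp2]
    have hvals : (D.keys.filter (fun key : Int => decide (key ≤ p.1))).map (fun key : Int => D.getD key 0)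
        = (D.keys.filter (fun key : Int => decide (key ≤ p.1))).map
            (fun key => ((nums.count (key + k) : Int) - (nums.count (key - k - 1) : Int))) :=
      List.map_congr_left (fun key _ => hval key)
    rw [hvals, pv_prefix_sum k p.1 nums D.keys hKnd
      (fun x hx => ⟨(hKmem (x - k)).2 ⟨x, hx, Or.inr (Or.inl rfl)⟩,
                    (hKmem (x + k + 1)).2 ⟨x, hx, Or.inr (Or.inr rfl)⟩⟩)]
    ring
  rw [pv_sweep nums k (fun v => (nums.count v : Int) + ops) L 0 0 hpre]
  -- both sides are now folds of max-min terms; compare them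
  set Cset : List Int := PySem.Set.union (PySem.Set.ofList nums) (nums.map (fun x => x - k)) with hCset
  have hCmem : ∀ c : Int, c ∈ Cset ↔ (c ∈ nums ∨ ∃ x ∈ nums, c = x - k) := by
    intro c
    rw [hCset]
    rw [PySem.Set.mem_union, PySem.Set.mem_ofList]
    constructor
    · rintro (h | h)
      · exact Or.inl h
      · obtain ⟨x, hx, he⟩ := List.mem_map.1 h
        exact Or.inr ⟨x, hx, he.symm⟩
    · rintro (h | ⟨x, hx, rfl⟩)
      · exact Or.inl h
      · exact Or.inr (List.mem_map.2 ⟨x, hx, rfl⟩)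
  have hLkey : ∀ pr : Int × Int, pr ∈ L → pr.1 ∈ D.keys := by
    intro pr hpr
    have : pr ∈ D.items := hperm.subset hpr
    exact List.mem_map_of_mem this
  apply le_antisymm
  · apply pv_foldl_max_le
    · exact (PySem.List.le_foldl_max_int Cset
        (fun c => min (pvW nums k c) ((nums.count c : Int) + ops)) 0).1
    · intro pr hpr
      exact pv_term_le nums k ops Cset pr.1 (fun c hc => (hCmem c).2 hc)
  · apply pv_foldl_max_le
    · exact (PySem.List.le_foldl_max_int L
        (fun pr : Int × Int => min (pvS nums k pr.1) ((nums.count pr.1 : Int) + ops)) 0).1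
    · intro c hc
      apply pv_cand_le
      have hck : c ∈ D.keys := by
        rcases (hCmem c).1 hc with h | ⟨x, hx, rfl⟩
        · exact (hKmem c).2 ⟨c, h, Or.inl rfl⟩
        · exact (hKmem (x - k)).2 ⟨x, hx, Or.inr (Or.inl rfl)⟩
      obtain ⟨pr, hpri, hpr1⟩ := List.mem_map.1 hck
      exact ⟨pr, hperm.mem_iff.2 hpri, hpr1⟩
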